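-- pv_equiv track=rewrite | github.com/EBI-Metagenomics/mobilome-annotation-pipeline | bin/prescan_to_fasta.py | scanf
-- ===== SOURCE A (Python) =====
-- def scanf(hmmlist):
--     """
--     Scan HMM list to determine if a contig contains essential ICE components.
--
--     This function analyzes a list of HMM hits to determine
--     whether a contig contains the essential components of an Integrative and
--     Conjugative Element (ICE), including mobilization proteins, Type IV coupling
--     proteins, integrases, and Type IV secretion systems.
--
--     :param hmmlist: List of HMM hit names
--     :type hmmlist: list
--     :return: True if contig contains essential ICE components, False otherwise
--     :rtype: bool
--
--     .. note::
--        The function requires at least: 1 MOB protein, 1 T4CP protein,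
--        1 integrase, and 5 T4SS proteins for a positive ICE classification.
--     """
--     ICEcount = []
--     for line in hmmlist:
--         if "MOB" in line:
--             ICEcount.append("MOB")
--         elif "t4cp" in line or "tcpA" in line:
--             ICEcount.append("t4cp")
--         elif "FA" in line:
--             ICEcount.append("T4SS")
--         elif line in [
--             "Phage_integrase",
--             "UPF0236",
--             "Recombinase",
--             "rve",
--             "TIGR02224",
--             "TIGR02249",
--             "TIGR02225",
--             "PB001819",
--         ]:
--             ICEcount.append("Int")
--         else:
--             ICEcount.append("T4SS")
--     if (
--         ICEcount.count("MOB")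
--         and ICEcount.count("t4cp")
--         and ICEcount.count("Int")
--         and ICEcount.count("T4SS") >= 5
--     ):
--         return True
--     else:
--         return False
-- ===== SOURCE B (Python) =====
-- _INTEGRASES = frozenset({
--     "Phage_integrase",
--     "UPF0236",
--     "Recombinase",
--     "rve",
--     "TIGR02224",
--     "TIGR02249",
--     "TIGR02225",
--     "PB001819",
-- })
--
--
-- def scanf(hmmlist):
--     # Staged sieve: each stage filters out the lines the previous component
--     # class consumed, so each component's presence is a length difference.
--     mob_free = [l for l in hmmlist if "MOB" not in l]
--     rest = [l for l in mob_free if "t4cp" not in l and "tcpA" not in l]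
--     intg = [l for l in rest if "FA" not in l and l in _INTEGRASES]
--     t4ss = len(rest) - len(intg)
--     return (len(mob_free) < len(hmmlist)      # some MOB line
--             and len(rest) < len(mob_free)     # some t4cp/tcpA line
--             and len(intg) > 0                 # some integrase line
--             and t4ss >= 5)                    # everything left is T4SS
-- ===== Notes on version B (the rewrite author's own statement) =====
-- stated objective: alternative
-- what changed: Replaces the if/elif label-list build plus four .count() scans with a staged filtering pipeline: successive sieves remove MOB then t4cp lines, component presence is read off as length differences and the T4SS count as a set-complement length.
import Mathlib
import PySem

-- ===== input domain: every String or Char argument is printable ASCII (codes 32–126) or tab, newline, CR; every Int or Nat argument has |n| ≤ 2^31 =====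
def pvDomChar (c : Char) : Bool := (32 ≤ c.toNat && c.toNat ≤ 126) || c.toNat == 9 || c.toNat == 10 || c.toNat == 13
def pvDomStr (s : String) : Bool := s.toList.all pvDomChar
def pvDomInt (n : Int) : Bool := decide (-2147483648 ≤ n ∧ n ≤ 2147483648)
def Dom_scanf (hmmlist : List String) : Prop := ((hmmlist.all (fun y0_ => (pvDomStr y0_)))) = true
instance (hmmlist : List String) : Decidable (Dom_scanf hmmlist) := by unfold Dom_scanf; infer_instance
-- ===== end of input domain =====

-- B replaces A's if/elif label list plus four .count scans by a staged filtering pipeline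
-- (sieve out MOB lines, then t4cp/tcpA lines; component presence read off as length
-- differences, the T4SS count as a complement length); objective: alternative decomposition.


-- ===== PORT A =====
-- the label A appends for one line (the if/elif chain of the loop body)
def iceLabel (line : String) : String :=
  if PySem.Str.isIn "MOB" line then "MOB"
  else if PySem.Str.isIn "t4cp" line || PySem.Str.isIn "tcpA" line then "t4cp"
  else if PySem.Str.isIn "FA" line then "T4SS"
  else if ["Phage_integrase", "UPF0236", "Recombinase", "rve",
           "TIGR02224", "TIGR02249", "TIGR02225", "PB001819"].contains line then "Int"
  else "T4SS"

def scanf (hmmlist : List String) : Bool :=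
  let ICEcount := hmmlist.foldl (fun acc line => acc ++ [iceLabel line]) ([] : List String)
  if PySem.List.count ICEcount "MOB" ≠ 0 ∧ PySem.List.count ICEcount "t4cp" ≠ 0 ∧
     PySem.List.count ICEcount "Int" ≠ 0 ∧ PySem.List.count ICEcount "T4SS" ≥ 5 then
    true
  else
    false

-- ===== PORT B =====
-- staged sieve: filter out MOB lines, then t4cp/tcpA lines, pick out the integrases,
-- and read every component off lengths
def scanf_alt (hmmlist : List String) : Bool :=
  let mobFree := hmmlist.filter (fun l => !(PySem.Str.isIn "MOB" l))
  let rest := mobFree.filter (fun l => !(PySem.Str.isIn "t4cp" l) && !(PySem.Str.isIn "tcpA" l))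
  let intg := rest.filter (fun l => !(PySem.Str.isIn "FA" l) &&
      ["Phage_integrase", "UPF0236", "Recombinase", "rve",
       "TIGR02224", "TIGR02249", "TIGR02225", "PB001819"].contains l)
  let t4ss := rest.length - intg.length
  decide (mobFree.length < hmmlist.length ∧ rest.length < mobFree.length ∧
          intg.length > 0 ∧ t4ss ≥ 5)

-- ===== PRECONDITION & SPEC =====
def Spec_scanf (hmmlist : List String) (out : Bool) : Prop := out = scanf_alt hmmlist
instance (hmmlist : List String) (out : Bool) : Decidable (Spec_scanf hmmlist out) := by unfold Spec_scanf; infer_instance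

-- ===== CLAIM (what is proved, stated in full; the proofs are below) =====
def Claim_equal_scanf : Prop := ∀ (hmmlist : List String), Dom_scanf hmmlist → Spec_scanf hmmlist (scanf hmmlist)

-- ===== LEMMAS AND PROOFS =====

-- the three line predicates B's sieves use (proof-side abbreviations)
def pM (l : String) : Bool := PySem.Str.isIn "MOB" l
def pT (l : String) : Bool := PySem.Str.isIn "t4cp" l || PySem.Str.isIn "tcpA" l
def pI (l : String) : Bool := !(PySem.Str.isIn "FA" l) &&
  ["Phage_integrase", "UPF0236", "Recombinase", "rve",
   "TIGR02224", "TIGR02249", "TIGR02225", "PB001819"].contains l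

-- A's label, characterised by the three predicates (one lemma per label)
theorem labelM (x : String) : (iceLabel x == "MOB") = pM x := by
  unfold iceLabel pM; split_ifs with h1 h2 h3 h4 <;> simp_all <;> intros <;> simp_all
theorem labelT (x : String) : (iceLabel x == "t4cp") = (!pM x && pT x) := by
  unfold iceLabel pM pT; split_ifs with h1 h2 h3 h4 <;> simp_all <;> intros <;> simp_all
theorem labelI (x : String) : (iceLabel x == "Int") = (!pM x && !pT x && pI x) := by
  unfold iceLabel pM pT pI; split_ifs with h1 h2 h3 h4 <;> simp_all <;> intros <;> simp_all
theorem labelS (x : String) : (iceLabel x == "T4SS") = (!pM x && !pT x && !pI x) := by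
  unfold iceLabel pM pT pI; split_ifs with h1 h2 h3 h4 <;> simp_all <;> intros <;> simp_all

-- counting a conjunction and its complement inside p adds up to counting p
theorem splitP (p q : String → Bool) (l : List String) :
    l.countP (fun x => p x && q x) + l.countP (fun x => p x && !q x) = l.countP p := by
  induction l with
  | nil => simp
  | cons x t ih => simp only [List.countP_cons]; cases hp : p x <;> cases hq : q x <;> simp <;> omega

theorem count_label (l : List String) (s : String) :
    List.count s (l.map iceLabel) = l.countP (fun x => iceLabel x == s) := by
  simp only [List.count_eq_countP, List.countP_map]; rfl

theorem length_filter_eq_countP (p : String → Bool) (l : List String) :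
    (l.filter p).length = l.countP p := by
  simp [List.countP_eq_length_filter]

-- A's four label counts as countP of the line predicates
theorem cM (l : List String) : l.countP (fun x => iceLabel x == "MOB") = l.countP pM :=
  List.countP_congr (fun x _ => by rw [labelM x])
theorem cT (l : List String) :
    l.countP (fun x => iceLabel x == "t4cp") = l.countP (fun x => !pM x && pT x) :=
  List.countP_congr (fun x _ => by rw [labelT x])
theorem cI (l : List String) :
    l.countP (fun x => iceLabel x == "Int") = l.countP (fun x => !pM x && (!pT x && pI x)) :=
  List.countP_congr (fun x _ => by rw [labelI x]; simp [Bool.and_assoc])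
theorem cS (l : List String) :
    l.countP (fun x => iceLabel x == "T4SS") = l.countP (fun x => !pM x && (!pT x && !pI x)) :=
  List.countP_congr (fun x _ => by rw [labelS x]; simp [Bool.and_assoc])

theorem scanf_eq (hmmlist : List String) : scanf hmmlist = scanf_alt hmmlist := by
  unfold scanf scanf_alt
  rw [PySem.List.foldl_append_singleton_eq_map]
  simp only [PySem.List.count_eq, List.nil_append, count_label,
    length_filter_eq_countP, List.countP_filter, cM, cT, cI, cS]
  rw [show (fun l => !PySem.Str.isIn "MOB" l) = (fun x => !pM x) from rfl]
  have g2 : hmmlist.countP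
      (fun a => !PySem.Str.isIn "t4cp" a && (!PySem.Str.isIn "tcpA" a && !PySem.Str.isIn "MOB" a))
      = hmmlist.countP (fun x => !pM x && !pT x) :=
    List.countP_congr (fun x _ => by
      simp only [pM, pT, Bool.and_eq_true, Bool.not_eq_true', Bool.or_eq_true, Bool.or_eq_false_iff]; tauto)
  have g3 : hmmlist.countP
      (fun a => !PySem.Str.isIn "FA" a &&
        (["Phage_integrase", "UPF0236", "Recombinase", "rve", "TIGR02224", "TIGR02249",
          "TIGR02225", "PB001819"].contains a &&
          ((!PySem.Str.isIn "t4cp" a && !PySem.Str.isIn "tcpA" a) && !PySem.Str.isIn "MOB" a)))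
      = hmmlist.countP (fun x => !pM x && (!pT x && pI x)) :=
    List.countP_congr (fun x _ => by
      simp only [pM, pT, pI, Bool.and_eq_true, Bool.not_eq_true', Bool.or_eq_true, Bool.or_eq_false_iff]; tauto)
  rw [show (fun a => !PySem.Str.isIn "t4cp" a && !PySem.Str.isIn "tcpA" a && !PySem.Str.isIn "MOB" a)
        = (fun a => !PySem.Str.isIn "t4cp" a && (!PySem.Str.isIn "tcpA" a && !PySem.Str.isIn "MOB" a)) from
      funext (fun a => by rw [Bool.and_assoc]), g2]
  rw [show (fun a => !PySem.Str.isIn "FA" a &&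
        ["Phage_integrase", "UPF0236", "Recombinase", "rve", "TIGR02224", "TIGR02249",
          "TIGR02225", "PB001819"].contains a &&
          (!PySem.Str.isIn "t4cp" a && !PySem.Str.isIn "tcpA" a) && !PySem.Str.isIn "MOB" a)
        = (fun a => !PySem.Str.isIn "FA" a &&
        (["Phage_integrase", "UPF0236", "Recombinase", "rve", "TIGR02224", "TIGR02249",
          "TIGR02225", "PB001819"].contains a &&
          ((!PySem.Str.isIn "t4cp" a && !PySem.Str.isIn "tcpA" a) && !PySem.Str.isIn "MOB" a))) from
      funext (fun a => by rw [Bool.and_assoc, Bool.and_assoc]), g3]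
  have h1 : hmmlist.length = hmmlist.countP pM + hmmlist.countP (fun x => !pM x) := by
    rw [List.length_eq_countP_add_countP pM]
    congr 1
    exact List.countP_congr (fun x _ => by simp)
  have h2 := splitP (fun x => !pM x) pT hmmlist
  have h3 := splitP (fun x => !pM x && !pT x) pI hmmlist
  have e3 : hmmlist.countP (fun x => (!pM x && !pT x) && pI x)
      = hmmlist.countP (fun x => !pM x && (!pT x && pI x)) :=
    List.countP_congr (fun x _ => by simp [Bool.and_assoc])
  have e4 : hmmlist.countP (fun x => (!pM x && !pT x) && !pI x)
      = hmmlist.countP (fun x => !pM x && (!pT x && !pI x)) :=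
    List.countP_congr (fun x _ => by simp [Bool.and_assoc])
  rw [e3, e4] at h3
  split_ifs with h
  · exact (decide_eq_true ⟨by omega, by omega, by omega, by omega⟩).symm
  · refine (decide_eq_false ?_).symm
    intro hc
    exact h ⟨by omega, by omega, by omega, by omega⟩

-- ===== VERDICT (by name: the statement is the Claim_ definition above) =====
theorem scanf_spec : Claim_equal_scanf := by
  intro hmmlist _
  exact scanf_eq hmmlist
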